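-- pv_equiv track=rewrite | github.com/MForofontov/python_utils | iterable_functions/dictionary_operations/sort_subdict_by_tuple.py | sort_subdict_by_tuple
-- ===== SOURCE A (Python) =====
-- from collections import OrderedDict
-- from typing import Any
--
-- def sort_subdict_by_tuple(
--     dict_: dict[str, dict[str, Any]], order: tuple[str, ...]
-- ) -> dict[str, OrderedDict[str, Any]]:
--     """
--     Sorts the sub-dictionaries of a given dictionary based on a specified order tuple.
--
--     Parameters
--     ----------
--     dict_ : dict[str, dict[str, Any]]
--         The input dictionary containing sub-dictionaries as values.
--     order : tuple[str, ...]
--         A tuple specifying the desired order of keys in the sorted sub-dictionaries.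
--
--     Returns
--     -------
--     dict[str, OrderedDict[str, Any]]
--         A new dictionary with each sub-dictionary sorted according to the specified order.
--
--     Raises
--     ------
--     TypeError
--         If dict_ is not a dictionary of dictionaries or order is not a tuple of strings.
--     """
--     if not isinstance(dict_, dict) or not all(
--         isinstance(subdict, dict) for subdict in dict_.values()
--     ):
--         raise TypeError("dict_ must be a dictionary with sub-dictionaries as values")
--     if not isinstance(order, tuple) or not all(isinstance(item, str) for item in order):
--         raise TypeError("order must be a tuple of strings")
--
--     sorted_data: dict[str, OrderedDict[str, Any]] = {}
--     for key, subdict in dict_.items():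
--         sorted_subdict = OrderedDict(
--             sorted(
--                 subdict.items(),
--                 key=lambda item: (
--                     order.index(item[0]) if item[0] in order else len(order)
--                 ),
--             )
--         )
--         sorted_data[key] = sorted_subdict
--     return sorted_data
-- ===== SOURCE B (Python) =====
-- from collections import OrderedDict
--
--
-- def sort_subdict_by_tuple(dict_, order):
--     if not isinstance(dict_, dict) or not all(
--         isinstance(subdict, dict) for subdict in dict_.values()
--     ):
--         raise TypeError("dict_ must be a dictionary with sub-dictionaries as values")
--     if not isinstance(order, tuple) or not all(isinstance(item, str) for item in order):
--         raise TypeError("order must be a tuple of strings")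
--
--     sorted_data = {}
--     for key, subdict in dict_.items():
--         # order-driven construction instead of a comparison sort: first the keys
--         # named by `order` (deduplicated, in order), then the leftovers in their
--         # original insertion order.
--         pairs = [(k, subdict[k]) for k in dict.fromkeys(order) if k in subdict]
--         pairs += [(k, v) for k, v in subdict.items() if k not in order]
--         sorted_data[key] = OrderedDict(pairs)
--     return sorted_data
-- ===== Notes on version B (the rewrite author's own statement) =====
-- stated objective: alternative
-- what changed: Each sub-dictionary is no longer comparison-sorted with an order.index key (a linear scan per comparison); B builds the result directly by one pass over the deduplicated order tuple (emitting present keys) followed by one pass over the sub-dict collecting the keys not in order, preserving their insertion order.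
import Mathlib
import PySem

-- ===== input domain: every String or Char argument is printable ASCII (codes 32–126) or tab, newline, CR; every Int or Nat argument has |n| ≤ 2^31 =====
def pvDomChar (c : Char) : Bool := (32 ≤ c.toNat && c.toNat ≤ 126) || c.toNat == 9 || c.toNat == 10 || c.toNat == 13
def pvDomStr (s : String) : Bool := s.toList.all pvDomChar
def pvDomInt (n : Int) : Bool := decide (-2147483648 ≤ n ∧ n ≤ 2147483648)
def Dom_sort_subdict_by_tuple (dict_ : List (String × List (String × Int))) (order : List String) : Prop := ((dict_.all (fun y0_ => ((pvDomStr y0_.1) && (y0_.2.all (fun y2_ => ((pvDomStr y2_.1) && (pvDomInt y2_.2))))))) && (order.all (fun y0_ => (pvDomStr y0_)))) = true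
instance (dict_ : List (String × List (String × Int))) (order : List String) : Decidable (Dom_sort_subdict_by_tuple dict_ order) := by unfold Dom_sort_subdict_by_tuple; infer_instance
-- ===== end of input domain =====

-- B replaces A's comparison sort of each sub-dictionary by an order-driven construction
-- (emit the keys named by `order`, deduplicated, then the leftovers in insertion order);
-- objective: alternative algorithm, same result.


-- ===== PORT A =====
-- A's sort key: `order.index(item[0]) if item[0] in order else len(order)`
-- (PySem.List.index? is some exactly on membership, so the match is that conditional).
def pvRank (order : List String) (k : String) : Nat :=
  match PySem.List.index? order k with
  | some i => i
  | none => order.length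

-- The two isinstance/TypeError guards always pass on the typed inputs and are not ported.
-- `sorted_data = {}` + `sorted_data[key] = …` in the loop is the Dict-insert fold; the
-- returned dict of OrderedDicts is its items list, each OrderedDict its items list.
def sort_subdict_by_tuple (dict_ : List (String × List (String × Int))) (order : List String) : List (String × List (String × Int)) :=
  (dict_.foldl
    (fun sorted_data kv =>
      sorted_data.insert kv.1 (PySem.List.sorted kv.2 (fun item => pvRank order item.1)))
    PySem.Dict.empty).items

-- ===== PORT B =====
-- `[(k, subdict[k]) for k in dict.fromkeys(order) if k in subdict]` (a guarded lookup
-- comprehension = filterMap over PySem.List.dedup) followed by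
-- `[(k, v) for k, v in subdict.items() if k not in order]` (a filter); the OrderedDict
-- built from the pairs is PySem.Dict.ofList.
def pvOrderedPairs (order : List String) (sub : List (String × Int)) : List (String × Int) :=
  ((PySem.List.dedup order).filterMap
      (fun k => ((PySem.Dict.mk sub).get? k).map (fun v => (k, v))))
    ++ sub.filter (fun kv => decide (kv.1 ∉ order))

def sort_subdict_by_tuple_alt (dict_ : List (String × List (String × Int))) (order : List String) : List (String × List (String × Int)) :=
  (dict_.foldl
    (fun sorted_data kv =>
      sorted_data.insert kv.1 (PySem.Dict.ofList (pvOrderedPairs order kv.2)).items)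
    PySem.Dict.empty).items

-- ===== PRECONDITION & SPEC =====
-- Pre_ excludes association lists in which some sub-dictionary has a duplicate key:
-- such lists do not represent Python dicts (dict construction collapses duplicates),
-- so neither Python function can ever receive them.
def Pre_sort_subdict_by_tuple (dict_ : List (String × List (String × Int))) (order : List String) : Prop :=
  ∀ kv ∈ dict_, (kv.2.map Prod.fst).Nodup
instance (dict_ : List (String × List (String × Int))) (order : List String) : Decidable (Pre_sort_subdict_by_tuple dict_ order) := by unfold Pre_sort_subdict_by_tuple; infer_instance
def pvWitness_sort_subdict_by_tuple : (List (String × List (String × Int))) × List String :=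
  ([("x", [("b", 1), ("a", 2), ("c", 3)])], ["a", "b"])

def Spec_sort_subdict_by_tuple (dict_ : List (String × List (String × Int))) (order : List String) (out : List (String × List (String × Int))) : Prop := out = sort_subdict_by_tuple_alt dict_ order
instance (dict_ : List (String × List (String × Int))) (order : List String) (out : List (String × List (String × Int))) : Decidable (Spec_sort_subdict_by_tuple dict_ order out) := by unfold Spec_sort_subdict_by_tuple; infer_instance

-- ===== CLAIM (what is proved, stated in full; the proofs are below) =====
def Claim_equal_sort_subdict_by_tuple : Prop := ∀ (dict_ : List (String × List (String × Int))) (order : List String), Dom_sort_subdict_by_tuple dict_ order → Pre_sort_subdict_by_tuple dict_ order → Spec_sort_subdict_by_tuple dict_ order (sort_subdict_by_tuple dict_ order)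

-- ===== LEMMAS AND PROOFS =====

-- pvRank facts: an index found by index? is within bounds, rank < len(order) iff the key
-- occurs in order, rank = len(order) iff it does not
lemma index?_lt (order : List String) (k : String) (i : Nat)
    (h : PySem.List.index? order k = some i) : i < order.length := by
  obtain ⟨pre, suf, h1, h2, _⟩ := (PySem.List.index?_eq_some_iff order k i).1 h
  subst h1; simp [← h2]

lemma pvRank_lt_iff (order : List String) (k : String) :
    pvRank order k < order.length ↔ k ∈ order := by
  unfold pvRank
  cases h : PySem.List.index? order k with
  | none => simp [(PySem.List.index?_eq_none_iff order k).1 h]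
  | some i =>
      have hm : k ∈ order := (PySem.List.index?_isSome_iff order k).1 (by rw [h]; rfl)
      simp [hm, index?_lt order k i h]

lemma pvRank_eq_iff (order : List String) (k : String) :
    pvRank order k = order.length ↔ k ∉ order := by
  unfold pvRank
  cases h : PySem.List.index? order k with
  | none => simp [(PySem.List.index?_eq_none_iff order k).1 h]
  | some i =>
      have hm : k ∈ order := (PySem.List.index?_isSome_iff order k).1 (by rw [h]; rfl)
      have := index?_lt order k i h
      simp [hm]; omega

lemma pvRank_le (order : List String) (k : String) : pvRank order k ≤ order.length := by
  unfold pvRank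
  cases h : PySem.List.index? order k with
  | none => simp
  | some i => exact le_of_lt (index?_lt order k i h)

-- first-occurrence dedup lists keys in strictly increasing first-index order
lemma dedup_pairwise_rank (order : List String) :
    (PySem.List.dedup order).Pairwise (fun a b => pvRank order a < pvRank order b) := by
  rw [PySem.List.dedup_eq_ofList]
  induction order using List.reverseRecOn with
  | nil => simp [PySem.Set.ofList_eq_foldl]
  | append_singleton l x ih =>
    have hof : PySem.Set.ofList (l ++ [x]) = PySem.Set.add (PySem.Set.ofList l) x := by
      simp [PySem.Set.ofList_eq_foldl, List.foldl_append]
    have hrank : ∀ a ∈ l, pvRank (l ++ [x]) a = pvRank l a := by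
      intro a ha
      obtain ⟨i, hi⟩ := Option.isSome_iff_exists.1 ((PySem.List.index?_isSome_iff l a).2 ha)
      unfold pvRank
      rw [PySem.List.index?_append_of_mem [x] ha, hi]
    by_cases hx : x ∈ l
    · rw [hof, PySem.Set.add_of_mem (by rw [PySem.Set.mem_ofList]; exact hx)]
      refine ih.imp_of_mem ?_
      intro a b ha hb hlt
      rw [hrank a ((PySem.Set.mem_ofList _ _).1 ha), hrank b ((PySem.Set.mem_ofList _ _).1 hb)]
      exact hlt
    · rw [hof, PySem.Set.add_of_not_mem (by rw [PySem.Set.mem_ofList]; exact hx)]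
      rw [List.pairwise_append]
      refine ⟨ih.imp_of_mem ?_, by simp, ?_⟩
      · intro a b ha hb hlt
        rw [hrank a ((PySem.Set.mem_ofList _ _).1 ha), hrank b ((PySem.Set.mem_ofList _ _).1 hb)]
        exact hlt
      · intro a ha b hb
        have ha' : a ∈ l := (PySem.Set.mem_ofList _ _).1 ha
        have hb' : b = x := by simpa using hb
        have h2 : pvRank (l ++ [x]) x = l.length := by
          unfold pvRank
          rw [PySem.List.index?_append_singleton_self (l := l) (c := x) hx]
        rw [hb', hrank a ha', h2]
        exact (pvRank_lt_iff l a).2 ha'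

-- inserting x past a block B every element of which x precedes
lemma insertBy_append_of_before {α : Type} (before : α → α → Bool) (x : α) (A B : List α)
    (hB : ∀ b ∈ B, before x b = true) :
    PySem.List.insertBy before x (A ++ B) = PySem.List.insertBy before x A ++ B := by
  induction A with
  | nil =>
    cases B with
    | nil => rfl
    | cons b B' => simp [PySem.List.insertBy, hB b (by simp)]
  | cons a A' ih =>
    by_cases hxa : before x a = true
    · simp [PySem.List.insertBy, hxa]
    · simp [PySem.List.insertBy, hxa, ih]

-- a stable sort with key values ≤ L splits into the sorted strictly-smaller block
-- followed by the key-equal-L elements in their original order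
lemma sorted_split {α : Type} (key : α → Nat) (L : Nat) (xs : List α)
    (h : ∀ x ∈ xs, key x ≤ L) :
    PySem.List.sorted xs key
      = PySem.List.sorted (xs.filter (fun x => decide (key x < L))) key
        ++ xs.filter (fun x => decide (key x = L)) := by
  induction xs using List.reverseRecOn with
  | nil => simp [PySem.List.sorted_eq_foldl_insertBy]
  | append_singleton l x ih =>
    have hl : ∀ y ∈ l, key y ≤ L := fun y hy => h y (by simp [hy])
    have hx : key x ≤ L := h x (by simp)
    rw [PySem.List.sorted_eq_foldl_insertBy, List.foldl_append,
      ← PySem.List.sorted_eq_foldl_insertBy]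
    simp only [List.foldl_cons, List.foldl_nil]
    rw [ih hl, List.filter_append, List.filter_append]
    rcases lt_or_eq_of_le hx with hlt | heq
    · have hne : ¬ key x = L := Nat.ne_of_lt hlt
      rw [insertBy_append_of_before _ x _ _
        (by
          intro b hb
          have hbL : key b = L := by simpa using (List.of_mem_filter hb)
          simp [hbL, hlt])]
      rw [show (List.filter (fun y => decide (key y < L)) [x]) = [x] by simp [hlt],
        show (List.filter (fun y => decide (key y = L)) [x]) = ([] : List α) by simp [hne],
        PySem.List.sorted_eq_foldl_insertBy (l.filter (fun x => decide (key x < L)) ++ [x]),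
        List.foldl_append, ← PySem.List.sorted_eq_foldl_insertBy]
      simp
    · rw [PySem.List.insertBy_of_forall_not_before _ x _
        (by
          intro y hy
          have hyL : key y ≤ L := by
            rcases List.mem_append.1 hy with hy1 | hy2
            · exact hl y (List.mem_of_mem_filter ((PySem.List.mem_sorted _ _ _ _).1 hy1))
            · exact hl y (List.mem_of_mem_filter hy2)
          simp; omega)]
      simp [heq, List.append_assoc]

-- a dict built from pairs with distinct keys lists exactly those pairs
lemma items_ofList_of_nodup (pairs : List (String × Int)) (h : (pairs.map Prod.fst).Nodup) :
    (PySem.Dict.ofList pairs).items = pairs := by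
  have hdef : PySem.Dict.ofList pairs
      = pairs.foldl (fun d p => d.insert p.1 p.2) PySem.Dict.empty := rfl
  rw [hdef,
    PySem.Dict.items_foldl_insert_fresh pairs Prod.fst Prod.snd PySem.Dict.empty
      (by intro a _; simp [PySem.Dict.contains_empty]) h]
  simp [PySem.Dict.empty]

-- the heart: on a sub-dictionary with distinct keys, A's stable sort by first index in
-- `order` equals B's order-driven pair list
lemma inner_eq (order : List String) (sub : List (String × Int))
    (h : (sub.map Prod.fst).Nodup) :
    PySem.List.sorted sub (fun item => pvRank order item.1)
      = (PySem.Dict.ofList (pvOrderedPairs order sub)).items := by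
  have hkeys : (PySem.Dict.mk sub).keys.Nodup := by
    simpa [PySem.Dict.keys_mk] using h
  have hget : ∀ (k : String) (v : Int), (PySem.Dict.mk sub).get? k = some v ↔ (k, v) ∈ sub :=
    fun k v => by simpa using PySem.Dict.get?_eq_some_iff_mem_items (PySem.Dict.mk sub) k v hkeys
  set P := ((PySem.List.dedup order).filterMap
      (fun k => ((PySem.Dict.mk sub).get? k).map (fun v => (k, v)))) with hP
  have hmemP : ∀ p : String × Int, p ∈ P ↔ p.1 ∈ order ∧ p ∈ sub := by
    intro p
    rw [hP]
    simp only [List.mem_filterMap]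
    constructor
    · rintro ⟨k, hk, hfk⟩
      obtain ⟨v, hv, hpv⟩ := Option.map_eq_some_iff.1 hfk
      have hk' : k ∈ order := by simpa [PySem.List.mem_dedup] using hk
      rw [← hpv]
      exact ⟨hk', (hget k v).1 hv⟩
    · rintro ⟨h1, h2⟩
      refine ⟨p.1, by simpa [PySem.List.mem_dedup] using h1, ?_⟩
      rw [(hget p.1 p.2).2 (by simpa using h2)]
      simp
  have hrankP : P.Pairwise (fun p q => pvRank order p.1 < pvRank order q.1) := by
    rw [hP]
    refine List.pairwise_filterMap.2 ((dedup_pairwise_rank order).imp ?_)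
    intro a a' hlt b hb b' hb'
    obtain ⟨v, _, hbv⟩ := Option.map_eq_some_iff.1 hb
    obtain ⟨v', _, hbv'⟩ := Option.map_eq_some_iff.1 hb'
    rw [← hbv, ← hbv']
    exact hlt
  have hPnodup : P.Nodup := by
    refine hrankP.imp ?_
    intro a b hlt heq
    rw [heq] at hlt
    exact absurd hlt (lt_irrefl _)
  have hsubnodup : sub.Nodup := h.of_map
  have hfilnodup : ((sub.filter (fun kv => decide (kv.1 ∉ order))).map Prod.fst).Nodup :=
    h.sublist ((List.filter_sublist (l := sub)).map Prod.fst)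
  have hpairsnodup : ((pvOrderedPairs order sub).map Prod.fst).Nodup := by
    unfold pvOrderedPairs
    rw [List.map_append]
    refine List.Nodup.append ?_ hfilnodup ?_
    · rw [← hP]
      have hmapP : (P.map Prod.fst).Pairwise (fun a b => pvRank order a < pvRank order b) :=
        List.pairwise_map.2 hrankP
      refine hmapP.imp ?_
      intro a b hlt heq
      rw [heq] at hlt
      exact absurd hlt (lt_irrefl _)
    · rw [List.disjoint_left]
      intro a ha ha'
      obtain ⟨p, hp, hpa⟩ := List.mem_map.1 ha
      obtain ⟨q, hq, hqa⟩ := List.mem_map.1 ha'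
      have h1 : a ∈ order := hpa ▸ ((hmemP p).1 hp).1
      have h2 : a ∉ order := by
        have := List.of_mem_filter hq
        rw [← hqa]
        simpa using this
      exact h2 h1
  rw [items_ofList_of_nodup _ hpairsnodup]
  unfold pvOrderedPairs
  rw [sorted_split (fun item => pvRank order item.1) order.length sub
    (fun x _ => pvRank_le order x.1)]
  congr 1
  · refine PySem.List.sorted_eq_of_perm_of_pairwise_lt _ P _ ?_ hrankP
    refine List.perm_of_nodup_nodup_toFinset_eq hPnodup (hsubnodup.filter _) ?_
    ext p
    simp only [List.mem_toFinset, List.mem_filter, hmemP p, decide_eq_true_eq,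
      pvRank_lt_iff]
    tauto
  · apply List.filter_congr
    intro x _
    simp [pvRank_eq_iff]

-- ===== VERDICT (by name: the statement is the Claim_ definition above) =====
theorem sort_subdict_by_tuple_spec : Claim_equal_sort_subdict_by_tuple := by
  intro dict_ order _ hpre
  unfold Spec_sort_subdict_by_tuple sort_subdict_by_tuple sort_subdict_by_tuple_alt
  rw [PySem.List.foldl_congr_mem _ _
      (fun sorted_data kv =>
        sorted_data.insert kv.1 (PySem.Dict.ofList (pvOrderedPairs order kv.2)).items) _
      (fun acc kv hkv => by rw [inner_eq order kv.2 (hpre kv hkv)])]
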